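-- pv_equiv track=rewrite | github.com/k-i-b-i-wott/Code-Sprints | problems/intermediate/secret_agent/secret agent.py | crackCodeN
-- ===== SOURCE A (Python) =====
-- def crackCodeN(code):
--
--     adjacent = {
--         '0': ['0', '8'],
--         '1': ['1', '2', '4'],
--         '2': ['1', '2', '3', '5'],
--         '3': ['2', '3', '6'],
--         '4': ['1', '4', '5', '7'],
--         '5': ['2', '4', '5', '6', '8'],
--         '6': ['3', '5', '6', '9'],
--         '7': ['4', '7', '8'],
--         '8': ['5', '7', '8', '9', '0'],
--         '9': ['6', '8', '9']
--     }
--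
--
--     result = list(adjacent[code[0]])
--
--
--     for digit in code[1:]:
--
--         current_possibilities = adjacent[digit]
--
--
--         new_result = []
--         for prefix in result:
--             for possibility in current_possibilities:
--                 new_result.append(prefix + possibility)
--         result = new_result
--
--     return result
-- ===== SOURCE B (Python) =====
-- def crackCodeN(code):
--     adjacent = {
--         '0': ['0', '8'],
--         '1': ['1', '2', '4'],
--         '2': ['1', '2', '3', '5'],
--         '3': ['2', '3', '6'],
--         '4': ['1', '4', '5', '7'],
--         '5': ['2', '4', '5', '6', '8'],
--         '6': ['3', '5', '6', '9'],
--         '7': ['4', '7', '8'],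
--         '8': ['5', '7', '8', '9', '0'],
--         '9': ['6', '8', '9']
--     }
--     # mixed-radix odometer decode: index i picks one choice per position,
--     # rightmost position varying fastest (same order as the cartesian build)
--     choices = [adjacent[d] for d in code]
--     total = 1
--     for c in choices:
--         total *= len(c)
--     result = []
--     for i in range(total):
--         rem = i
--         s = []
--         for c in reversed(choices):
--             rem, k = divmod(rem, len(c))
--             s.append(c[k])
--         result.append(''.join(reversed(s)))
--     return result
-- ===== Notes on version B (the rewrite author's own statement) =====
-- stated objective: alternative
-- what changed: Replaces the incremental prefix-list cartesian build (re-materialising the whole result list after every digit) by a mixed-radix odometer: compute the total count and decode each index i in range(total) into one string directly.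
import Mathlib
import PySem

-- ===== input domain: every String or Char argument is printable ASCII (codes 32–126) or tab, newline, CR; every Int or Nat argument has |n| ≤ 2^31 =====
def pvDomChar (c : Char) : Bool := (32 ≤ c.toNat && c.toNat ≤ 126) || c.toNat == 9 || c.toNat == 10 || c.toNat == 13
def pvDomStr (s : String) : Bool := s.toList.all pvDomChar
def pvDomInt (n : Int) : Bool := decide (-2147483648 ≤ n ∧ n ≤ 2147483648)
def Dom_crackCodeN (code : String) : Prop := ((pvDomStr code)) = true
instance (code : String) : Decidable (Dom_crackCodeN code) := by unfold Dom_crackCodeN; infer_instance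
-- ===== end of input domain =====

-- B replaces A's incremental prefix-list cartesian build by a mixed-radix odometer decode
-- (alternative decomposition, same output order; same asymptotic cost).
-- The dict values are lists of single-character strings; they are represented as Lean Chars
-- (exact: every element and every appended piece is one character).

-- ===== PORT A =====
-- the dict lookup 'adjacent[d]' (shared literal dict of both Pythons); [] stands for
-- Python's KeyError on a non-digit key, excluded by Pre_
def adjacent (d : Char) : List Char :=
  if d = '0' then ['0', '8']
  else if d = '1' then ['1', '2', '4']
  else if d = '2' then ['1', '2', '3', '5']
  else if d = '3' then ['2', '3', '6']
  else if d = '4' then ['1', '4', '5', '7']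
  else if d = '5' then ['2', '4', '5', '6', '8']
  else if d = '6' then ['3', '5', '6', '9']
  else if d = '7' then ['4', '7', '8']
  else if d = '8' then ['5', '7', '8', '9', '0']
  else if d = '9' then ['6', '8', '9']
  else []

-- result strings are kept as List Char and turned back into String at the end (exact).
-- code[0] raises IndexError on the empty string — excluded by Pre_ (headD's default is never
-- used inside Pre_); code[1:] is List.drop 1 (exact for a nonnegative start).
def crackCodeN (code : String) : List String :=
  let cs := code.toList
  let init := (adjacent (cs.headD ' ')).map (fun c => [c])   -- result = list(adjacent[code[0]])
  let result := (cs.drop 1).foldl (fun result digit =>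
      let cur := adjacent digit
      result.foldl (fun newResult pre =>
        cur.foldl (fun nr possibility => nr ++ [pre ++ [possibility]]) newResult) []) init
  result.map String.mk

-- ===== PORT B =====
def crackCodeN_alt (code : String) : List String :=
  let choices := code.toList.map (fun d => adjacent d)
  let total := (choices.map List.length).foldl (fun a s => a * s) 1
  (List.range total).map (fun i =>
    -- rem, k = divmod(rem, len(c)); s.append(c[k])  over reversed(choices)
    let st := choices.reverse.foldl
      (fun (st : Nat × List Char) c =>
        (st.1 / c.length, st.2 ++ [c.getD (st.1 % c.length) ' '])) (i, ([] : List Char))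
    String.mk st.2.reverse)

-- ===== PRECONDITION & SPEC =====
-- Pre_ excludes exactly the inputs on which A raises: the empty string (IndexError on code[0])
-- and strings containing a non-digit character (KeyError on the dict lookup).
def Pre_crackCodeN (code : String) : Prop :=
  code.toList ≠ [] ∧ code.toList.all (fun c => ['0','1','2','3','4','5','6','7','8','9'].contains c) = true
instance (code : String) : Decidable (Pre_crackCodeN code) := by unfold Pre_crackCodeN; infer_instance
def pvWitness_crackCodeN : String := "19"

def Spec_crackCodeN (code : String) (out : List String) : Prop := out = crackCodeN_alt code
instance (code : String) (out : List String) : Decidable (Spec_crackCodeN code out) := by unfold Spec_crackCodeN; infer_instance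

-- ===== CLAIM (what is proved, stated in full; the proofs are below) =====
def Claim_equal_crackCodeN : Prop := ∀ (code : String), Dom_crackCodeN code → Pre_crackCodeN code → Spec_crackCodeN code (crackCodeN code)

-- ===== LEMMAS AND PROOFS =====

-- the cartesian product both programs compute, first position slowest
def pvCart : List (List Char) → List (List Char)
  | [] => [[]]
  | c :: rest => c.flatMap (fun x => (pvCart rest).map (fun s => x :: s))

def pvProd (L : List (List Char)) : Nat := (L.map List.length).prod

lemma pvProd_pos (L : List (List Char)) (h : ∀ c ∈ L, 0 < c.length) : 0 < pvProd L := by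
  induction L with
  | nil => simp [pvProd]
  | cons c rest ih =>
    have := h c (List.mem_cons_self ..)
    have := ih (fun x hx => h x (List.mem_cons_of_mem _ hx))
    simp only [pvProd, List.map_cons, List.prod_cons] at *
    positivity

lemma map_getD_range (c : List Char) :
    (List.range c.length).map (fun q => c.getD q ' ') = c := by
  induction c with
  | nil => simp
  | cons x c ih =>
    rw [List.length_cons, List.range_succ_eq_map, List.map_cons, List.map_map]
    simp only [List.getD_cons_zero, Function.comp_def, List.getD_cons_succ]
    rw [ih]

-- structural (left-to-right) mixed-radix decode
def pvDecode : List (List Char) → Nat → List Char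
  | [], _ => []
  | c :: rest, i => c.getD (i / pvProd rest) ' ' :: pvDecode rest (i % pvProd rest)

-- ---- A-side: the double foldl is a flatMap, and the outer fold builds pvCart ----

lemma stepA_eq (result : List (List Char)) (digit : Char) :
    result.foldl (fun newResult pre =>
        (adjacent digit).foldl (fun nr possibility => nr ++ [pre ++ [possibility]]) newResult) []
      = result.flatMap (fun pre => (adjacent digit).map (fun x => pre ++ [x])) := by
  rw [show (fun (newResult : List (List Char)) (pre : List Char) =>
        (adjacent digit).foldl (fun nr possibility => nr ++ [pre ++ [possibility]]) newResult)
      = (fun newResult pre => newResult ++ (adjacent digit).map (fun x => pre ++ [x])) from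
      funext fun nr => funext fun pre => PySem.List.foldl_append_singleton_eq_map ..]
  simpa using PySem.List.foldl_append_eq_flatMap (l := result) (acc := [])
    (g := fun pre => (adjacent digit).map (fun x => pre ++ [x]))

lemma foldA_eq (L : List Char) (acc : List (List Char)) :
    L.foldl (fun result digit =>
      result.foldl (fun newResult pre =>
        (adjacent digit).foldl (fun nr possibility => nr ++ [pre ++ [possibility]]) newResult) []) acc
      = acc.flatMap (fun pre => (pvCart (L.map adjacent)).map (fun s => pre ++ s)) := by
  induction L generalizing acc with
  | nil => simp [pvCart]
  | cons d L ih =>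
    rw [List.foldl_cons, ih, stepA_eq]
    simp [pvCart, List.flatMap_map, List.map_flatMap, List.flatMap_assoc, List.map_map,
      Function.comp_def]

lemma crackCodeN_eq_cart (c0 : Char) (rest : List Char) (code : String)
    (h : code.toList = c0 :: rest) :
    crackCodeN code = (pvCart ((c0 :: rest).map adjacent)).map String.mk := by
  show ((code.toList.drop 1).foldl _ ((adjacent (code.toList.headD ' ')).map (fun c => [c]))).map String.mk = _
  rw [h]
  simp only [List.headD_cons, List.drop_one, List.tail_cons]
  rw [foldA_eq]
  simp [pvCart, List.flatMap_map, List.map_flatMap, List.map_map, Function.comp_def]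

-- ---- B-side: the reversed rem/divmod loop is the structural decode ----

lemma revloop_eq (L : List (List Char)) (i : Nat) (s : List Char) :
    L.reverse.foldl
      (fun (st : Nat × List Char) c =>
        (st.1 / c.length, st.2 ++ [c.getD (st.1 % c.length) ' '])) (i, s)
      = (i / pvProd L, s ++ (pvDecode L (i % pvProd L)).reverse) := by
  induction L generalizing i s with
  | nil => simp [pvProd, pvDecode]
  | cons c L ih =>
    rw [List.reverse_cons, List.foldl_append, ih]
    have h1 : i / pvProd L / c.length = i / pvProd (c :: L) := by
      rw [Nat.div_div_eq_div_mul]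
      simp [pvProd, Nat.mul_comm]
    have h2 : i % pvProd (c :: L) / pvProd L = i / pvProd L % c.length := by
      have : pvProd (c :: L) = c.length * pvProd L := by simp [pvProd]
      rw [this, Nat.mul_comm c.length, Nat.mod_mul_right_div_self]
    have h3 : i % pvProd (c :: L) % pvProd L = i % pvProd L := by
      have : pvProd (c :: L) = c.length * pvProd L := by simp [pvProd]
      rw [this, Nat.mod_mul_left_mod]
    simp [pvDecode, h1, h2, h3, List.foldl_cons]

lemma range_mul_flatMap (a b : Nat) :
    List.range (a * b) = (List.range a).flatMap (fun q => (List.range b).map (fun r => q * b + r)) := by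
  induction a with
  | zero => simp
  | succ a ih =>
    rw [Nat.succ_mul, List.range_add, ih, List.range_succ, List.flatMap_append]
    simp

lemma decode_range_eq_cart (L : List (List Char)) (h : ∀ c ∈ L, 0 < c.length) :
    (List.range (pvProd L)).map (pvDecode L) = pvCart L := by
  induction L with
  | nil =>
    simp [pvProd, pvDecode, pvCart]
  | cons c L ih =>
    have hb : 0 < pvProd L := pvProd_pos L (fun x hx => h x (List.mem_cons_of_mem _ hx))
    have hc : pvProd (c :: L) = c.length * pvProd L := by simp [pvProd]
    rw [hc, range_mul_flatMap, List.map_flatMap]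
    have hq : ∀ q r, r < pvProd L →
        pvDecode (c :: L) (q * pvProd L + r) = c.getD q ' ' :: pvDecode L r := by
      intro q r hr
      have e1 : (q * pvProd L + r) / pvProd L = q := by
        rw [Nat.mul_comm q, Nat.mul_add_div hb, Nat.div_eq_of_lt hr, Nat.add_zero]
      have e2 : (q * pvProd L + r) % pvProd L = r := by
        rw [Nat.mul_comm q, Nat.mul_add_mod, Nat.mod_eq_of_lt hr]
      simp [pvDecode, e1, e2]
    calc (List.range c.length).flatMap
          (fun q => ((List.range (pvProd L)).map (fun r => q * pvProd L + r)).map (pvDecode (c :: L)))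
        = (List.range c.length).flatMap
          (fun q => (pvCart L).map (fun s => c.getD q ' ' :: s)) := by
          refine List.flatMap_congr ?_
          intro q _
          rw [List.map_map]
          rw [show ((pvDecode (c :: L)) ∘ fun r => q * pvProd L + r)
              = (fun r => pvDecode (c :: L) (q * pvProd L + r)) from rfl]
          rw [← ih (fun x hx => h x (List.mem_cons_of_mem _ hx)), List.map_map]
          refine List.map_congr_left ?_
          intro r hr
          simp only [Function.comp]
          exact hq q r (List.mem_range.mp hr)
      _ = pvCart (c :: L) := by
          conv_rhs => rw [show pvCart (c :: L) = c.flatMap (fun x => (pvCart L).map (fun s => x :: s)) from rfl,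
            ← map_getD_range c]
          rw [List.flatMap_map]
  

lemma crackCodeN_alt_eq_cart (code : String) (h : ∀ c ∈ code.toList, 0 < (adjacent c).length) :
    crackCodeN_alt code = (pvCart (code.toList.map adjacent)).map String.mk := by
  have hpos : ∀ c ∈ code.toList.map adjacent, 0 < c.length := by
    intro c hc
    obtain ⟨d, hd, rfl⟩ := List.mem_map.mp hc
    exact h d hd
  show (List.range (((code.toList.map adjacent).map List.length).foldl (fun a s => a * s) 1)).map _ = _
  have htot : ((code.toList.map adjacent).map List.length).foldl (fun a s => a * s) 1
      = pvProd (code.toList.map adjacent) := by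
    rw [pvProd, List.prod_eq_foldl]
  rw [htot, ← decode_range_eq_cart _ hpos, List.map_map]
  refine List.map_congr_left ?_
  intro i hi
  rw [revloop_eq, Nat.mod_eq_of_lt (List.mem_range.mp hi)]
  simp

lemma adjacent_pos (c : Char) (h : c ∈ ['0','1','2','3','4','5','6','7','8','9']) :
    0 < (adjacent c).length := by
  simp only [List.mem_cons, List.not_mem_nil, or_false] at h
  rcases h with rfl|rfl|rfl|rfl|rfl|rfl|rfl|rfl|rfl|rfl <;> decide

-- ===== VERDICT (by name: the statement is the Claim_ definition above) =====
theorem crackCodeN_spec : Claim_equal_crackCodeN := by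
  intro code _ hpre
  obtain ⟨hne, hdig⟩ := hpre
  obtain ⟨c0, rest, hcs⟩ : ∃ c0 rest, code.toList = c0 :: rest := by
    cases h : code.toList with
    | nil => exact absurd h hne
    | cons a l => exact ⟨a, l, rfl⟩
  have hdig' : ∀ c ∈ code.toList, c ∈ ['0','1','2','3','4','5','6','7','8','9'] := by
    simpa using hdig
  have hpos : ∀ c ∈ code.toList, 0 < (adjacent c).length :=
    fun c hc => adjacent_pos c (hdig' c hc)
  show crackCodeN code = crackCodeN_alt code
  rw [crackCodeN_eq_cart c0 rest code hcs, crackCodeN_alt_eq_cart code hpos, hcs]
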